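-- pv_equiv track=rewrite | github.com/frank321312/I.P.C | guia-4/diccionarios/ejercicio_5.py | caracter_mas_largo
-- ===== SOURCE A (Python) =====
-- def caracter_mas_largo(cadena: str):
--     diccionario = {}
--
--     for i in list(cadena.replace(" ", "")):
--         contador = 0
--         for palabra in cadena.split(" "):
--             if (palabra.count(i) > contador):
--                 contador = palabra.count(i)
--                 diccionario[i] = palabra
--
--     return diccionario
-- ===== SOURCE B (Python) =====
-- def caracter_mas_largo(cadena: str):
--     best = {}
--     for palabra in cadena.split(" "):
--         conteo = {}
--         for ch in palabra:
--             conteo[ch] = conteo.get(ch, 0) + 1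
--         for ch, n in conteo.items():
--             if n > (best[ch][0] if ch in best else 0):
--                 best[ch] = (n, palabra)
--     return {c: best[c][1] for c in dict.fromkeys(cadena.replace(" ", ""))}
-- ===== Notes on version B (the rewrite author's own statement) =====
-- stated objective: faster
-- what changed: B inverts the loop structure: instead of A's char-major nested scan (for every character occurrence, rescan every word counting that character), B makes one word-major pass, counting each word's characters once into a dict and updating a running best (count, word) per character, then emits the keys in first-occurrence order; the inner rescan of all words per character disappears.
import Mathlib
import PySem

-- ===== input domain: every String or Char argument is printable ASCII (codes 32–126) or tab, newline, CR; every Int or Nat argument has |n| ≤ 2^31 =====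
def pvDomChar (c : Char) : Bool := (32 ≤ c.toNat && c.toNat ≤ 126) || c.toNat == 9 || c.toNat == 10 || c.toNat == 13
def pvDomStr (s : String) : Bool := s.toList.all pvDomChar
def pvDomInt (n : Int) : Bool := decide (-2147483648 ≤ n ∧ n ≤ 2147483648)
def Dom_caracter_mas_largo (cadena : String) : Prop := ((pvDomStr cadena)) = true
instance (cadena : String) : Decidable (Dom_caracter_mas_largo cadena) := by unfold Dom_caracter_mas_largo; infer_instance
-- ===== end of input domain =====

-- B inverts A's char-major nested scan into one word-major pass (per-word character counts, a
-- running best (count, word) per character), then emits keys in first-occurrence order; faster.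

-- ===== PORT A =====
-- Python iterates the string yielding 1-char strings; the dict is kept with Char keys and the
-- 1-char-string keys are rebuilt at the end (String.ofList [c] IS that 1-char string, exact).
def caracter_mas_largo (cadena : String) : List (String × String) :=
  (((PySem.Chars.replace cadena.toList [' '] []).foldl
      (fun (d : PySem.Dict Char (List Char)) i =>
        ((PySem.Chars.splitOn cadena.toList [' ']).foldl
            (fun (st : Int × PySem.Dict Char (List Char)) palabra =>
              if ((PySem.Chars.count palabra [i] : Int) > st.1) then
                ((PySem.Chars.count palabra [i] : Int), st.2.insert i palabra)
              else st)
            (0, d)).2)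
      PySem.Dict.empty).items).map (fun p => (String.ofList [p.1], String.ofList p.2))

-- ===== PORT B =====
-- Source B: one pass over the words; conteo counts the word's chars; best[ch] = (count, word) updated
-- on strictly greater count; final comprehension over the deduplicated stripped string.
-- best[c] in the comprehension: the key is always present (c occurs in some word), so the
-- getD default (0, []) is never taken — exact for Python's best[c].
def caracter_mas_largo_alt (cadena : String) : List (String × String) :=
  let palabras := PySem.Chars.splitOn cadena.toList [' ']
  let best := palabras.foldl
      (fun (best : PySem.Dict Char (Int × List Char)) palabra =>
        let conteo := palabra.foldl
            (fun (d : PySem.Dict Char Int) ch => d.insert ch (d.getD ch 0 + 1))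
            PySem.Dict.empty
        conteo.items.foldl
          (fun (best : PySem.Dict Char (Int × List Char)) p =>
            if p.2 > (match best.get? p.1 with | some b => b.1 | none => 0) then
              best.insert p.1 (p.2, palabra)
            else best)
          best)
      PySem.Dict.empty
  (((PySem.List.dedup (PySem.Chars.replace cadena.toList [' '] [])).foldl
      (fun (d : PySem.Dict Char (List Char)) c =>
        d.insert c ((best.getD c (0, [])).2))
      PySem.Dict.empty).items).map (fun p => (String.ofList [p.1], String.ofList p.2))

-- ===== PRECONDITION & SPEC =====
def Spec_caracter_mas_largo (cadena : String) (out : List (String × String)) : Prop := out = caracter_mas_largo_alt cadena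
instance (cadena : String) (out : List (String × String)) : Decidable (Spec_caracter_mas_largo cadena out) := by unfold Spec_caracter_mas_largo; infer_instance

-- ===== CLAIM (what is proved, stated in full; the proofs are below) =====
def Claim_equal_caracter_mas_largo : Prop := ∀ (cadena : String), Dom_caracter_mas_largo cadena → Spec_caracter_mas_largo cadena (caracter_mas_largo cadena)

-- ===== LEMMAS AND PROOFS =====

-- count of a single-character needle is List.count

theorem cml_count_go (c : Char) : ∀ (l : List Char) (f a : Nat), l.length ≤ f →
    PySem.Chars.count.go [c] f l a = a + l.count c := by
  intro l
  induction l with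
  | nil =>
    intro f a _
    cases f <;> simp [PySem.Chars.count.go]
  | cons x t ih =>
    intro f a hf
    cases f with
    | zero => simp at hf
    | succ f =>
      have step : PySem.Chars.count.go [c] (f+1) (x::t) a =
          if [c].isPrefixOf (x::t) then PySem.Chars.count.go [c] f t (a+1)
          else PySem.Chars.count.go [c] f t a := rfl
      rw [step]
      have hp : [c].isPrefixOf (x::t) = (c == x) := by simp [List.isPrefixOf]
      rw [hp]
      have hf' : t.length ≤ f := by simpa using hf
      by_cases h : c = x
      · subst h; rw [if_pos (by simp), ih f (a+1) hf', List.count_cons_self]; omega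
      · rw [if_neg (by simp [h]), ih f a hf']; simp [Ne.symm h]

theorem cml_count_singleton (c : Char) (l : List Char) :
    PySem.Chars.count l [c] = l.count c := by
  have h0 : PySem.Chars.count l [c] = PySem.Chars.count.go [c] l.length l 0 := by
    simp [PySem.Chars.count]
  rw [h0, cml_count_go c l l.length 0 le_rfl, Nat.zero_add]

-- replace(" ", "") is filter

theorem cml_replace_go : ∀ (l : List Char) (f : Nat) (acc : List Char), l.length ≤ f →
    PySem.Chars.replace.go [' '] [] f l acc = acc.reverse ++ l.filter (· != ' ') := by
  intro l
  induction l with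
  | nil => intro f acc _; cases f <;> simp [PySem.Chars.replace.go]
  | cons x t ih =>
    intro f acc hf
    cases f with
    | zero => simp at hf
    | succ f =>
      have step : PySem.Chars.replace.go [' '] [] (f+1) (x::t) acc =
          if [' '].isPrefixOf (x::t) then PySem.Chars.replace.go [' '] [] f t ([].reverse ++ acc)
          else PySem.Chars.replace.go [' '] [] f t (x :: acc) := rfl
      rw [step]
      have hp : [' '].isPrefixOf (x::t) = (' ' == x) := by simp [List.isPrefixOf]
      rw [hp]
      have hf' : t.length ≤ f := by simpa using hf
      by_cases h : ' ' = x
      · subst h; rw [if_pos (by simp)]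
        simp [ih f acc hf']
      · rw [if_neg (by simp [h]), ih f (x :: acc) hf']
        simp [Ne.symm h]

theorem cml_replace_space (s : List Char) :
    PySem.Chars.replace s [' '] [] = s.filter (· != ' ') := by
  have h0 : PySem.Chars.replace s [' '] [] = PySem.Chars.replace.go [' '] [] s.length s [] := by
    simp [PySem.Chars.replace]
  rw [h0, cml_replace_go s s.length [] le_rfl]
  simp

-- the words of split(" ") concatenate to the space-stripped string

theorem cml_splitOn_go : ∀ (l : List Char) (f : Nat) (cur : List Char) (acc : List (List Char)),
    l.length ≤ f →
    (PySem.Chars.splitOn.go [' '] f l cur acc).flatten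
      = acc.reverse.flatten ++ cur.reverse ++ l.filter (· != ' ') := by
  intro l
  induction l with
  | nil => intro f cur acc _; cases f <;> simp [PySem.Chars.splitOn.go]
  | cons x t ih =>
    intro f cur acc hf
    cases f with
    | zero => simp at hf
    | succ f =>
      have step : PySem.Chars.splitOn.go [' '] (f+1) (x::t) cur acc =
          if [' '].isPrefixOf (x::t) then PySem.Chars.splitOn.go [' '] f t [] (cur.reverse :: acc)
          else PySem.Chars.splitOn.go [' '] f t (x :: cur) acc := rfl
      rw [step]
      have hp : [' '].isPrefixOf (x::t) = (' ' == x) := by simp [List.isPrefixOf]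
      rw [hp]
      have hf' : t.length ≤ f := by simpa using hf
      by_cases h : ' ' = x
      · subst h; rw [if_pos (by simp), ih f [] (cur.reverse :: acc) hf']
        simp
      · rw [if_neg (by simp [h]), ih f (x :: cur) acc hf']
        simp [Ne.symm h]

theorem cml_flatten_splitOn (s : List Char) :
    (PySem.Chars.splitOn s [' ']).flatten = s.filter (· != ' ') := by
  have h0 : PySem.Chars.splitOn s [' '] = PySem.Chars.splitOn.go [' '] (s.length + 1) s [] [] := by
    simp [PySem.Chars.splitOn]
  rw [h0, cml_splitOn_go s (s.length + 1) [] [] (by omega)]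
  simp

-- A's inner first-max scan (without the dict)
def cmlFmStep (c : Char) (st : Int × Option (List Char)) (p : List Char) : Int × Option (List Char) :=
  if ((PySem.Chars.count p [c] : Int) > st.1) then ((PySem.Chars.count p [c] : Int), some p) else st

theorem cml_fm_or (c : Char) : ∀ (ws : List (List Char)) (k : Int) (o : Option (List Char)),
    ws.foldl (cmlFmStep c) (k, o)
      = ((ws.foldl (cmlFmStep c) (k, none)).1, ((ws.foldl (cmlFmStep c) (k, none)).2).or o) := by
  intro ws
  induction ws with
  | nil => intro k o; simp
  | cons w ws ih =>
    intro k o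
    simp only [List.foldl_cons]
    by_cases h : ((PySem.Chars.count w [c] : Int) > k)
    · rw [show cmlFmStep c (k, o) w = ((PySem.Chars.count w [c] : Int), some w) from by
        simp [cmlFmStep, h]]
      rw [show cmlFmStep c (k, none) w = ((PySem.Chars.count w [c] : Int), some w) from by
        simp [cmlFmStep, h]]
      rw [ih _ (some w)]
      cases hO : (ws.foldl (cmlFmStep c) ((PySem.Chars.count w [c] : Int), none)).2 <;> simp
    · rw [show cmlFmStep c (k, o) w = (k, o) from by simp [cmlFmStep, h]]
      rw [show cmlFmStep c (k, none) w = (k, none) from by simp [cmlFmStep, h]]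
      exact ih k o

-- A's inner loop = the scan plus at most one insert

theorem cml_inner_eq (c : Char) : ∀ (ws : List (List Char)) (k : Int) (d : PySem.Dict Char (List Char)),
    ws.foldl
        (fun (st : Int × PySem.Dict Char (List Char)) palabra =>
          if ((PySem.Chars.count palabra [c] : Int) > st.1) then
            ((PySem.Chars.count palabra [c] : Int), st.2.insert c palabra)
          else st) (k, d)
      = ((ws.foldl (cmlFmStep c) (k, none)).1,
          match (ws.foldl (cmlFmStep c) (k, none)).2 with
          | none => d
          | some w => d.insert c w) := by
  intro ws
  induction ws with
  | nil => intro k d; simp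
  | cons w ws ih =>
    intro k d
    simp only [List.foldl_cons]
    by_cases h : ((PySem.Chars.count w [c] : Int) > k)
    · rw [if_pos h]
      rw [show cmlFmStep c (k, none) w = ((PySem.Chars.count w [c] : Int), some w) from by
        simp [cmlFmStep, h]]
      rw [ih _ (d.insert c w), cml_fm_or c ws _ (some w)]
      cases hO : (ws.foldl (cmlFmStep c) ((PySem.Chars.count w [c] : Int), none)).2 with
      | none => simp
      | some w' => simp [PySem.Dict.insert_insert_self]
    · rw [if_neg h]
      rw [show cmlFmStep c (k, none) w = (k, none) from by simp [cmlFmStep, h]]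
      exact ih k d

theorem cml_fm_none_iff (c : Char) : ∀ (ws : List (List Char)) (k : Int),
    (ws.foldl (cmlFmStep c) (k, none)).2 = none ↔ ∀ w ∈ ws, (PySem.Chars.count w [c] : Int) ≤ k := by
  intro ws
  induction ws with
  | nil => intro k; simp
  | cons w ws ih =>
    intro k
    simp only [List.foldl_cons]
    by_cases h : ((PySem.Chars.count w [c] : Int) > k)
    · rw [show cmlFmStep c (k, none) w = ((PySem.Chars.count w [c] : Int), some w) from by
        simp [cmlFmStep, h]]
      rw [cml_fm_or c ws _ (some w)]
      constructor
      · intro hn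
        exfalso
        cases hO : (ws.foldl (cmlFmStep c) ((PySem.Chars.count w [c] : Int), none)).2 <;>
          simp [hO] at hn
      · intro hall
        exact absurd (hall w (by simp)) (by omega)
    · rw [show cmlFmStep c (k, none) w = (k, none) from by simp [cmlFmStep, h]]
      rw [ih k]
      constructor
      · intro hall w' hw'
        rcases hw' with _ | hw'
        · omega
        · exact hall _ (by assumption)
      · intro hall w' hw'
        exact hall w' (List.mem_cons_of_mem _ hw')

-- if the scan never fires, its running max stays at the start value
theorem cml_fm_fst_of_none (c : Char) : ∀ (ws : List (List Char)) (k : Int),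
    (ws.foldl (cmlFmStep c) (k, none)).2 = none → (ws.foldl (cmlFmStep c) (k, none)).1 = k := by
  intro ws
  induction ws with
  | nil => intro k _; rfl
  | cons w ws ih =>
    intro k hn
    simp only [List.foldl_cons] at *
    by_cases h : ((PySem.Chars.count w [c] : Int) > k)
    · rw [show cmlFmStep c (k, none) w = ((PySem.Chars.count w [c] : Int), some w) from by
        simp [cmlFmStep, h]] at hn
      rw [cml_fm_or c ws _ (some w)] at hn
      cases hO : (ws.foldl (cmlFmStep c) ((PySem.Chars.count w [c] : Int), none)).2 <;>
        simp [hO] at hn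
    · rw [show cmlFmStep c (k, none) w = (k, none) from by simp [cmlFmStep, h]] at *
      exact ih k hn

-- B's running best: current count at a key
def cmlCur (b : PySem.Dict Char (Int × List Char)) (c : Char) : Int :=
  match b.get? c with | some x => x.1 | none => 0

-- B's inner per-pair update and per-word step (definitionally the port's lambdas)
def cmlInnerStep (pal : List Char) (best : PySem.Dict Char (Int × List Char)) (p : Char × Int) :
    PySem.Dict Char (Int × List Char) :=
  if p.2 > cmlCur best p.1 then best.insert p.1 (p.2, pal) else best

def cmlWordStep (best : PySem.Dict Char (Int × List Char)) (palabra : List Char) :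
    PySem.Dict Char (Int × List Char) :=
  ((palabra.foldl (fun (d : PySem.Dict Char Int) ch => d.insert ch (d.getD ch 0 + 1))
      PySem.Dict.empty).items).foldl (cmlInnerStep palabra) best

-- the inner fold never touches keys outside its pair list
theorem cml_inner_preserve (pal : List Char) (v : Char → Int) :
    ∀ (ks : List Char) (best : PySem.Dict Char (Int × List Char)) (c : Char), c ∉ ks →
    ((ks.map (fun k => (k, v k))).foldl (cmlInnerStep pal) best).get? c = best.get? c := by
  intro ks
  induction ks with
  | nil => intro best c _; rfl
  | cons k ks ih =>
    intro best c hc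
    have hck : c ≠ k := fun h => hc (h ▸ List.mem_cons_self)
    have hcks : c ∉ ks := fun h => hc (List.mem_cons_of_mem _ h)
    simp only [List.map_cons, List.foldl_cons]
    rw [ih _ _ hcks]
    unfold cmlInnerStep
    split_ifs with h
    · exact PySem.Dict.get?_insert_of_ne _ _ hck
    · rfl

-- lookup after the inner fold: updated iff the key occurs with a strictly larger count
theorem cml_inner_get? (pal : List Char) (v : Char → Int) :
    ∀ (ks : List Char) (best : PySem.Dict Char (Int × List Char)) (c : Char), ks.Nodup →
    ((ks.map (fun k => (k, v k))).foldl (cmlInnerStep pal) best).get? c =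
      if c ∈ ks ∧ v c > cmlCur best c then some (v c, pal) else best.get? c := by
  intro ks
  induction ks with
  | nil => intro best c _; simp
  | cons k ks ih =>
    intro best c hnd
    have hndk : k ∉ ks := (List.nodup_cons.mp hnd).1
    have hndks : ks.Nodup := (List.nodup_cons.mp hnd).2
    simp only [List.map_cons, List.foldl_cons]
    by_cases hck : c = k
    · subst hck
      rw [cml_inner_preserve pal v ks _ c hndk]
      unfold cmlInnerStep
      by_cases h : v c > cmlCur best c
      · rw [if_pos h, PySem.Dict.get?_insert_self, if_pos ⟨List.mem_cons_self, h⟩]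
      · rw [if_neg h, if_neg (by intro hx; exact h hx.2)]
    · have hb' : (cmlInnerStep pal best (k, v k)).get? c = best.get? c := by
        unfold cmlInnerStep
        split_ifs with h
        · exact PySem.Dict.get?_insert_of_ne _ _ hck
        · rfl
      have hcur : cmlCur (cmlInnerStep pal best (k, v k)) c = cmlCur best c := by
        unfold cmlCur; rw [hb']
      rw [ih _ _ hndks, hcur, hb']
      by_cases hm : c ∈ ks
      · simp [hm, hck]
      · simp [hm, hck]

-- B's word-major pass, at one key, equals A's first-max scan over the words
theorem cml_wordmajor (c : Char) : ∀ (ws : List (List Char)) (best : PySem.Dict Char (Int × List Char)),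
    0 ≤ cmlCur best c →
    (ws.foldl cmlWordStep best).get? c =
      (match (ws.foldl (cmlFmStep c) (cmlCur best c, none)).2 with
       | some w => some ((ws.foldl (cmlFmStep c) (cmlCur best c, none)).1, w)
       | none => best.get? c) := by
  intro ws
  induction ws with
  | nil => intro best _; rfl
  | cons w ws ih =>
    intro best hpos
    simp only [List.foldl_cons]
    have hconteo : (w.foldl (fun (d : PySem.Dict Char Int) ch => d.insert ch (d.getD ch 0 + 1))
        PySem.Dict.empty) = PySem.Dict.counter w :=
      PySem.Dict.foldl_insert_getD_add_one_eq_counter w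
    have hitems : (PySem.Dict.counter w).items =
        (PySem.Set.ofList w).map (fun k => (k, (w.count k : Int))) := PySem.Dict.items_counter w
    have hstep : cmlWordStep best w =
        ((PySem.Set.ofList w).map (fun k => (k, (w.count k : Int)))).foldl (cmlInnerStep w) best := by
      unfold cmlWordStep; rw [hconteo, hitems]
    have hget : (cmlWordStep best w).get? c =
        if c ∈ PySem.Set.ofList w ∧ (w.count c : Int) > cmlCur best c then
          some ((w.count c : Int), w) else best.get? c := by
      rw [hstep]; exact cml_inner_get? w _ _ best c (PySem.Set.nodup_ofList w)
    have hcount : (PySem.Chars.count w [c] : Int) = (w.count c : Int) := by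
      rw [cml_count_singleton]
    by_cases h : (w.count c : Int) > cmlCur best c
    · -- the scan fires; c must occur in w
      have hmem : c ∈ PySem.Set.ofList w := by
        rw [PySem.Set.mem_ofList]
        have : 0 < w.count c := by
          by_contra hb
          have : w.count c = 0 := by omega
          rw [this] at h; simp at h; omega
        exact List.count_pos_iff.mp this
      have hb' : (cmlWordStep best w).get? c = some ((w.count c : Int), w) := by
        rw [hget, if_pos ⟨hmem, h⟩]
      have hcur' : cmlCur (cmlWordStep best w) c = (w.count c : Int) := by
        unfold cmlCur; rw [hb']
      have hfm : cmlFmStep c (cmlCur best c, none) w = ((w.count c : Int), some w) := by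
        simp only [cmlFmStep, hcount]; rw [if_pos h]
      rw [hfm, ih _ (by rw [hcur']; positivity), hcur', hb',
        cml_fm_or c ws _ (some w)]
      cases hO : (ws.foldl (cmlFmStep c) ((w.count c : Int), none)).2 with
      | some w' => simp
      | none => simp [cml_fm_fst_of_none c ws _ hO]
    · -- no update at c (if c ∉ w then count = 0 ≤ cur as cur ≥ 0)
      have hb' : (cmlWordStep best w).get? c = best.get? c := by
        rw [hget, if_neg (by intro hx; exact h hx.2)]
      have hcur' : cmlCur (cmlWordStep best w) c = cmlCur best c := by
        unfold cmlCur; rw [hb']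
      have hfm : cmlFmStep c (cmlCur best c, none) w = (cmlCur best c, none) := by
        simp only [cmlFmStep, hcount]; rw [if_neg (by omega)]
      rw [hfm, ih _ (by rw [hcur']; exact hpos), hcur', hb']

-- lookup in a fold of key-determined inserts

theorem cml_get?_foldl_insert (g : Char → List Char) :
    ∀ (l : List Char) (d : PySem.Dict Char (List Char)) (x : Char),
    (l.foldl (fun d c => d.insert c (g c)) d).get? x = if x ∈ l then some (g x) else d.get? x := by
  intro l
  induction l with
  | nil => intro d x; simp
  | cons a t ih =>
    intro d x
    simp only [List.foldl_cons]
    rw [ih]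
    by_cases hm : x ∈ t
    · simp [hm]
    · by_cases hx : x = a
      · subst hx; simp [hm, PySem.Dict.get?_insert_self]
      · simp [hm, hx, PySem.Dict.get?_insert_of_ne _ _ hx]

theorem cml_items_foldl_insert (g : Char → List Char) (l : List Char) :
    (l.foldl (fun d c => d.insert c (g c)) PySem.Dict.empty).items
      = (PySem.Set.ofList l).map (fun c => (c, g c)) := by
  have hkeys : (l.foldl (fun d c => d.insert c (g c)) PySem.Dict.empty).keys
      = PySem.Set.ofList l := by
    rw [PySem.Dict.keys_foldl_insert l (fun _ c => g c) PySem.Dict.empty]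
    rw [PySem.Dict.keys_empty]
    exact PySem.Set.update_empty l
  have hnd : (l.foldl (fun d c => d.insert c (g c)) PySem.Dict.empty).keys.Nodup := by
    rw [hkeys]; exact PySem.Set.nodup_ofList l
  rw [PySem.Dict.items_eq_map_keys _ hnd [], hkeys]
  apply List.map_congr_left
  intro k hk
  have hkl : k ∈ l := (PySem.Set.mem_ofList l k).mp hk
  rw [PySem.Dict.getD_eq_get?_getD, cml_get?_foldl_insert g l PySem.Dict.empty k, if_pos hkl]
  rfl

-- the central items equality, over the raw character list
theorem cml_items_main (s : List Char) :
    ((PySem.Chars.replace s [' '] []).foldl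
        (fun (d : PySem.Dict Char (List Char)) i =>
          ((PySem.Chars.splitOn s [' ']).foldl
              (fun (st : Int × PySem.Dict Char (List Char)) palabra =>
                if ((PySem.Chars.count palabra [i] : Int) > st.1) then
                  ((PySem.Chars.count palabra [i] : Int), st.2.insert i palabra)
                else st)
              (0, d)).2)
        PySem.Dict.empty).items
      = ((PySem.List.dedup (PySem.Chars.replace s [' '] [])).foldl
          (fun (d : PySem.Dict Char (List Char)) c =>
            d.insert c ((((PySem.Chars.splitOn s [' ']).foldl cmlWordStep
                PySem.Dict.empty).getD c (0, [])).2))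
          PySem.Dict.empty).items := by
  have hflat : (PySem.Chars.splitOn s [' ']).flatten = PySem.Chars.replace s [' '] [] := by
    rw [cml_replace_space, cml_flatten_splitOn]
  have hsome : ∀ i ∈ PySem.Chars.replace s [' '] [],
      ∃ w, (((PySem.Chars.splitOn s [' ']).foldl (cmlFmStep i) ((0:Int), none)).2) = some w := by
    intro i hi
    rw [← hflat] at hi
    obtain ⟨w, hw, hiw⟩ := List.mem_flatten.mp hi
    have hc : 0 < PySem.Chars.count w [i] := by
      rw [cml_count_singleton]; exact List.count_pos_iff.mpr hiw
    cases hx : (((PySem.Chars.splitOn s [' ']).foldl (cmlFmStep i) ((0:Int), none)).2) with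
    | some w' => exact ⟨w', rfl⟩
    | none =>
      have := (cml_fm_none_iff i _ 0).mp hx w hw
      omega
  have hA : (PySem.Chars.replace s [' '] []).foldl
        (fun (d : PySem.Dict Char (List Char)) i =>
          ((PySem.Chars.splitOn s [' ']).foldl
              (fun (st : Int × PySem.Dict Char (List Char)) palabra =>
                if ((PySem.Chars.count palabra [i] : Int) > st.1) then
                  ((PySem.Chars.count palabra [i] : Int), st.2.insert i palabra)
                else st)
              (0, d)).2)
        PySem.Dict.empty
      = (PySem.Chars.replace s [' '] []).foldl
          (fun (d : PySem.Dict Char (List Char)) i =>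
            d.insert i ((((PySem.Chars.splitOn s [' ']).foldl (cmlFmStep i) ((0:Int), none)).2).getD []))
          PySem.Dict.empty := by
    apply PySem.List.foldl_congr_mem
    intro d i hi
    rw [cml_inner_eq i]
    obtain ⟨w, hw⟩ := hsome i hi
    rw [hw]
    rfl
  rw [hA, cml_items_foldl_insert, cml_items_foldl_insert,
      PySem.List.dedup_eq_ofList, PySem.Set.ofList_ofList]
  apply List.map_congr_left
  intro k hk
  have hkl : k ∈ PySem.Chars.replace s [' '] [] :=
    (PySem.Set.mem_ofList _ k).mp hk
  obtain ⟨w, hw⟩ := hsome k hkl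
  have hwm := cml_wordmajor k (PySem.Chars.splitOn s [' ']) PySem.Dict.empty (by simp [cmlCur])
  have hcur0 : cmlCur PySem.Dict.empty k = 0 := by simp [cmlCur]
  rw [hcur0] at hwm
  rw [PySem.Dict.getD_eq_get?_getD, hwm, hw]
  simp

-- ===== VERDICT (by name: the statement is the Claim_ definition above) =====
theorem caracter_mas_largo_spec : Claim_equal_caracter_mas_largo := by
  intro cadena _
  unfold Spec_caracter_mas_largo caracter_mas_largo caracter_mas_largo_alt
  rw [cml_items_main cadena.toList]
  rfl
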